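-- pv_equiv track=rewrite | github.com/pypi-data/pypi-mirror-401 | packages/cate/cate-1.1.tar.gz/cate-1.1/src/cate/core.py | _apply_transition
-- ===== SOURCE A (Python) =====
-- def convert_order_position(vector):
--     """Convert an order vector into a position vector, and vice-versa."""
--     # order vectors and position vectors are dual objects, see the definition
--     # of final_position for a more detailed description
--     dual = [None] * len(vector)
--     for i, item in enumerate(vector):
--         dual[item] = i
--     return dual
--
-- def _apply_transition(position, transition):
--     """Compute the position reached by applying transition to position."""
--     order = convert_order_position(position)
--     new_position = list(position)  # do not alter original position
--     for left, right in transition: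
--         new_position[order[left]], new_position[order[right]] = (
--             new_position[order[right]],
--             new_position[order[left]],
--         )
--         order[left], order[right] = order[right], order[left]
--
--     return tuple(new_position)
-- ===== SOURCE B (Python) =====
-- def convert_order_position(vector):
--     """Convert an order vector into a position vector, and vice-versa."""
--     dual = [None] * len(vector)
--     for i, item in enumerate(vector):
--         dual[item] = i
--     return dual
--
-- def _apply_transition(position, transition):
--     """Compute the position reached by applying transition to position."""
--     order = convert_order_position(position)
--     swaps = []
--     for left, right in transition:   # phase 1: turn transitions into slot swaps
--         i, j = order[left], order[right]
--         swaps.append((i, j))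
--         order[left], order[right] = j, i
--     src = list(range(len(position)))  # phase 2: compose the net slot permutation
--     for i, j in swaps:
--         src[i], src[j] = src[j], src[i]
--     return tuple(position[s] for s in src)
-- ===== Notes on version B (the rewrite author's own statement) =====
-- stated objective: alternative
-- what changed: B splits A's single loop (which threads both the position copy and the order vector) into phases: it records the slot-swap index pairs while updating only the order vector, composes the net slot permutation by applying them to an identity index list, and gathers the result from the original position in one final comprehension, never swapping a copy of position per transition.
import Mathlib
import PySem

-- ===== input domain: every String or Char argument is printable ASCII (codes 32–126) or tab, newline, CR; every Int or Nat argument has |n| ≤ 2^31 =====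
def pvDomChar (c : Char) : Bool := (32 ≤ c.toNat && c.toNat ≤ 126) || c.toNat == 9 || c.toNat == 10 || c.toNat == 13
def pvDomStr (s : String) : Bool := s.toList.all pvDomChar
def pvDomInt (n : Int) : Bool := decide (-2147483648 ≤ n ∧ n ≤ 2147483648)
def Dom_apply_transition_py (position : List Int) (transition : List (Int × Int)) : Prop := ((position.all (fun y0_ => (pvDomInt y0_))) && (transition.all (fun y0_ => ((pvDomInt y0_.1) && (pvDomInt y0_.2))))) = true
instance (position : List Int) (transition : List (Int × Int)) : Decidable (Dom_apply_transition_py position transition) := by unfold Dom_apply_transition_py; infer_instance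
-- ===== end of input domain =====

-- B records the slot-swap index pairs while updating only the order vector, composes the net
-- slot permutation on an identity index list, and gathers from position once at the end,
-- instead of A's swapping both the position copy and the order vector in one loop
-- (objective: alternative decomposition, same cost).

-- ===== PORT A =====
-- helper of A: convert_order_position (dual = [None]*len(vector); dual[item] = i)
def convert_order_position_py (vector : List Int) : List (Option Int) :=
  (PySem.List.enumerate vector).foldl
    (fun dual p => PySem.List.pySetD dual p.2 (some p.1))
    (List.replicate vector.length none)

def apply_transition_py (position : List Int) (transition : List (Int × Int)) : List Int :=
  let order := convert_order_position_py position
  let new_position := position   -- list(position): a fresh copy in Python; values identical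
  (transition.foldl
    (fun (st : List Int × List (Option Int)) t =>
      -- order[left] / order[right]; the `.getD 0` de-options a None entry (a TypeError in
      -- Python, excluded by Pre_)
      let oL : Int := (PySem.List.pyGetD st.2 t.1 none).getD 0
      let oR : Int := (PySem.List.pyGetD st.2 t.2 none).getD 0
      let vL : Int := PySem.List.pyGetD st.1 oL 0
      let vR : Int := PySem.List.pyGetD st.1 oR 0
      (PySem.List.pySetD (PySem.List.pySetD st.1 oL vR) oR vL,
       PySem.List.pySetD (PySem.List.pySetD st.2 t.1 (some oR)) t.2 (some oL)))
    (new_position, order)).1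

-- ===== PORT B =====
def apply_transition_py_alt (position : List Int) (transition : List (Int × Int)) : List Int :=
  let order := convert_order_position_py position
  -- phase 1: turn transitions into slot-swap index pairs, updating only `order`
  let phase1 := transition.foldl
    (fun (st : List (Option Int) × List (Option Int × Option Int)) t =>
      let i := PySem.List.pyGetD st.1 t.1 none
      let j := PySem.List.pyGetD st.1 t.2 none
      (PySem.List.pySetD (PySem.List.pySetD st.1 t.1 j) t.2 i, st.2 ++ [(i, j)]))
    (order, [])
  -- phase 2: compose the net slot permutation on list(range(n));
  -- `.getD 0` de-options a stored None (a TypeError in Python, excluded by Pre_)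
  let src := phase1.2.foldl
    (fun src (p : Option Int × Option Int) =>
      PySem.List.pySetD
        (PySem.List.pySetD src (p.1.getD 0) (PySem.List.pyGetD src (p.2.getD 0) 0))
        (p.2.getD 0) (PySem.List.pyGetD src (p.1.getD 0) 0))
    (PySem.List.pyRange 0 (position.length : Int) 1)
  src.map (fun s => PySem.List.pyGetD position s 0)

-- ===== PRECONDITION & SPEC =====
-- the Nat index a Python in-range index i denotes (wraparound for negatives)
def pvIdx (n : Nat) (i : Int) : Nat := if 0 ≤ i then i.toNat else n - (-i).toNat

-- Pre_ is exactly the set of inputs on which Python A returns: every position entry is a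
-- valid index (else conversion raises IndexError) and every transition endpoint is a valid
-- index (else IndexError) whose slot was written by some position entry (else the loop reads
-- a None and raises TypeError).
def Pre_apply_transition_py (position : List Int) (transition : List (Int × Int)) : Prop :=
  (∀ x ∈ position, PySem.Raise.InRange position.length x) ∧
  ∀ t ∈ transition,
    PySem.Raise.InRange position.length t.1 ∧ PySem.Raise.InRange position.length t.2 ∧
    pvIdx position.length t.1 ∈ position.map (pvIdx position.length) ∧
    pvIdx position.length t.2 ∈ position.map (pvIdx position.length)

instance (position : List Int) (transition : List (Int × Int)) : Decidable (Pre_apply_transition_py position transition) := by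
  unfold Pre_apply_transition_py PySem.Raise.InRange; infer_instance

def pvWitness_apply_transition_py : List Int × (List (Int × Int)) := ([2, 0, 1], [(0, 2), (-1, 1)])

def Spec_apply_transition_py (position : List Int) (transition : List (Int × Int)) (out : List Int) : Prop := out = apply_transition_py_alt position transition
instance (position : List Int) (transition : List (Int × Int)) (out : List Int) : Decidable (Spec_apply_transition_py position transition out) := by unfold Spec_apply_transition_py; infer_instance

-- ===== CLAIM (what is proved, stated in full; the proofs are below) =====
def Claim_equal_apply_transition_py : Prop := ∀ (position : List Int) (transition : List (Int × Int)), Dom_apply_transition_py position transition → Pre_apply_transition_py position transition → Spec_apply_transition_py position transition (apply_transition_py position transition)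

-- ===== LEMMAS AND PROOFS =====

-- proof-side names for the loop bodies (verbatim the lambdas of the ports)
def pvStepA (st : List Int × List (Option Int)) (t : Int × Int) : List Int × List (Option Int) :=
  let oL : Int := (PySem.List.pyGetD st.2 t.1 none).getD 0
  let oR : Int := (PySem.List.pyGetD st.2 t.2 none).getD 0
  let vL : Int := PySem.List.pyGetD st.1 oL 0
  let vR : Int := PySem.List.pyGetD st.1 oR 0
  (PySem.List.pySetD (PySem.List.pySetD st.1 oL vR) oR vL,
   PySem.List.pySetD (PySem.List.pySetD st.2 t.1 (some oR)) t.2 (some oL))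

def pvStepB1 (st : List (Option Int) × List (Option Int × Option Int)) (t : Int × Int) :
    List (Option Int) × List (Option Int × Option Int) :=
  let i := PySem.List.pyGetD st.1 t.1 none
  let j := PySem.List.pyGetD st.1 t.2 none
  (PySem.List.pySetD (PySem.List.pySetD st.1 t.1 j) t.2 i, st.2 ++ [(i, j)])

def pvStepSwap (src : List Int) (p : Option Int × Option Int) : List Int :=
  PySem.List.pySetD
    (PySem.List.pySetD src (p.1.getD 0) (PySem.List.pyGetD src (p.2.getD 0) 0))
    (p.2.getD 0) (PySem.List.pyGetD src (p.1.getD 0) 0)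

-- the same swap on a pure index list
def pvSwapN (S : List Nat) (p : Option Int × Option Int) : List Nat :=
  (S.set (p.1.getD 0).toNat (S.getD (p.2.getD 0).toNat 0)).set
    (p.2.getD 0).toNat (S.getD (p.1.getD 0).toNat 0)

lemma pvIdx_lt {n : Nat} {i : Int} (h : PySem.Raise.InRange n i) : pvIdx n i < n := by
  obtain ⟨h1, h2⟩ := h
  unfold pvIdx; split_ifs with h0 <;> omega

lemma pyIdx?_inrange {n : Nat} {i : Int} (h : PySem.Raise.InRange n i) :
    PySem.List.pyIdx? n i = some (pvIdx n i) := by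
  obtain ⟨h1, h2⟩ := h
  unfold PySem.List.pyIdx? pvIdx
  split_ifs <;> simp_all

lemma pyGetD_inrange {α : Type} (xs : List α) (i : Int) (d : α)
    (h : PySem.Raise.InRange xs.length i) :
    PySem.List.pyGetD xs i d = xs[pvIdx xs.length i]'(pvIdx_lt h) := by
  unfold PySem.List.pyGetD PySem.List.pyGet?
  rw [pyIdx?_inrange h]
  simp [List.getElem?_eq_getElem (pvIdx_lt h)]

lemma pySetD_inrange {α : Type} (xs : List α) (i : Int) (v : α)
    (h : PySem.Raise.InRange xs.length i) :
    PySem.List.pySetD xs i v = xs.set (pvIdx xs.length i) v := by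
  unfold PySem.List.pySetD PySem.List.pySet?
  rw [pyIdx?_inrange h]
  rfl

lemma pyGetD_eq_of_getElem? {α : Type} {xs : List α} {i : Int} {d x : α} {k : Nat}
    (h : PySem.Raise.InRange xs.length i) (hk : pvIdx xs.length i = k) (hx : xs[k]? = some x) :
    PySem.List.pyGetD xs i d = x := by
  rw [pyGetD_inrange _ _ _ h]
  obtain ⟨hlt, he⟩ := List.getElem?_eq_some_iff.mp hx
  subst hk
  exact he

-- ---- characterization of an "out[idx] = val" write loop ----

def pvStepSet {α : Type} (acc : List α) (p : Int × α) : List α := PySem.List.pySetD acc p.1 p.2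

lemma setFold_length {α : Type} (pairs : List (Int × α)) (init : List α) :
    (pairs.foldl pvStepSet init).length = init.length := by
  induction pairs generalizing init with
  | nil => rfl
  | cons p ps ih => simp [pvStepSet, ih, PySem.List.length_pySetD]

-- every slot some pair writes holds, at the end, a value satisfying P
lemma setFold_prop {α : Type} (P : α → Prop) (pairs : List (Int × α)) (init : List α)
    (hv : ∀ p ∈ pairs, PySem.Raise.InRange init.length p.1 ∧ P p.2) (k : Nat)
    (hbase : (∃ x, init[k]? = some x ∧ P x) ∨ ∃ p ∈ pairs, pvIdx init.length p.1 = k) :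
    ∃ x, (pairs.foldl pvStepSet init)[k]? = some x ∧ P x := by
  induction pairs generalizing init with
  | nil =>
      rcases hbase with h | ⟨p, hp, _⟩
      · exact h
      · cases hp
  | cons q ps ih =>
      obtain ⟨hq, hPq⟩ := hv q (by simp)
      have hset : pvStepSet init q = init.set (pvIdx init.length q.1) q.2 :=
        pySetD_inrange _ _ _ hq
      have hlen : (pvStepSet init q).length = init.length := by
        simp [pvStepSet, PySem.List.length_pySetD]
      rw [List.foldl_cons]
      refine ih (pvStepSet init q)
        (fun p hp => by rw [hlen]; exact hv p (by simp [hp])) ?_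
      by_cases hk : pvIdx init.length q.1 = k
      · refine Or.inl ⟨q.2, ?_, hPq⟩
        rw [hset, ← hk]
        exact List.getElem?_set_self (by simpa using pvIdx_lt hq)
      · rcases hbase with ⟨x, hx, hPx⟩ | ⟨p, hp, hpk⟩
        · exact Or.inl ⟨x, by rw [hset, List.getElem?_set_ne hk]; exact hx, hPx⟩
        · rcases List.mem_cons.mp hp with rfl | hp'
          · exact absurd hpk hk
          · exact Or.inr ⟨p, hp', by rw [hlen]; exact hpk⟩

-- enumerate as an index loop
lemma enumerate_eq_map_range (xs : List Int) (s : Int) :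
    PySem.List.enumerate xs s = (List.range xs.length).map (fun i : Nat => ((s + (i : Int), xs.getD i 0) : Int × Int)) := by
  induction xs generalizing s with
  | nil => simp [PySem.List.enumerate]
  | cons x xs ih =>
      rw [PySem.List.enumerate_cons, ih]
      simp only [List.length_cons, List.range_succ_eq_map, List.map_cons, List.map_map]
      congr 1
      · simp
      · apply List.map_congr_left
        intro i _
        simp only [Function.comp_apply, List.getD_cons_succ, Prod.mk.injEq]
        exact ⟨by push_cast; ring, trivial⟩

def pvPairsA (xs : List Int) : List (Int × Option Int) :=
  (List.range xs.length).map (fun i => (xs.getD i 0, some (i : Int)))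

lemma convA_eq (xs : List Int) :
    convert_order_position_py xs = (pvPairsA xs).foldl pvStepSet (List.replicate xs.length none) := by
  unfold convert_order_position_py pvPairsA
  rw [enumerate_eq_map_range, List.foldl_map, List.foldl_map]
  simp [pvStepSet]

lemma conv_length (xs : List Int) : (convert_order_position_py xs).length = xs.length := by
  rw [convA_eq, setFold_length, List.length_replicate]

-- every written slot of the order vector holds `some m` with m < n
lemma conv_written (position : List Int)
    (hb : ∀ x ∈ position, PySem.Raise.InRange position.length x) (k : Nat)
    (hw : k ∈ position.map (pvIdx position.length)) :
    ∃ m : Nat, m < position.length ∧ (convert_order_position_py position)[k]? = some (some (m : Int)) := by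
  rw [convA_eq]
  have hlen : (List.replicate position.length (none : Option Int)).length = position.length := by simp
  have h := setFold_prop (fun x => ∃ m : Nat, m < position.length ∧ x = some (m : Int))
    (pvPairsA position) (List.replicate position.length none)
    (by
      intro p hp
      obtain ⟨i, hi, rfl⟩ := List.mem_map.mp hp
      have hi' := List.mem_range.mp hi
      have hmem : position.getD i 0 ∈ position := by
        rw [List.getD_eq_getElem _ _ hi']
        exact List.getElem_mem _
      exact ⟨by rw [hlen]; exact hb _ hmem, ⟨i, hi', rfl⟩⟩) k
    (by
      right
      obtain ⟨x, hx, rfl⟩ := List.mem_map.mp hw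
      obtain ⟨i, hi, rfl⟩ := List.mem_iff_getElem.mp hx
      refine ⟨(position.getD i 0, some (i : Int)), ?_, ?_⟩
      · exact List.mem_map.mpr ⟨i, List.mem_range.mpr hi, by rw [List.getD_eq_getElem _ _ hi]⟩
      · rw [hlen, List.getD_eq_getElem _ _ hi])
  obtain ⟨x, hx, m, hm, rfl⟩ := h
  exact ⟨m, hm, hx⟩

-- invariant of the order vector along both loops
def pvOInv (n : Nat) (W : List Nat) (ord : List (Option Int)) : Prop :=
  ord.length = n ∧ ∀ k ∈ W, ∃ m : Nat, m < n ∧ ord[k]? = some (some (m : Int))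

def pvValid (n : Nat) (W : List Nat) (ts : List (Int × Int)) : Prop :=
  ∀ t ∈ ts, PySem.Raise.InRange n t.1 ∧ PySem.Raise.InRange n t.2 ∧
    pvIdx n t.1 ∈ W ∧ pvIdx n t.2 ∈ W

-- the accumulator of phase 1 factors out
lemma b1_acc (ts : List (Int × Int)) :
    ∀ (ord : List (Option Int)) (acc : List (Option Int × Option Int)),
      ts.foldl pvStepB1 (ord, acc)
        = ((ts.foldl pvStepB1 (ord, [])).1, acc ++ (ts.foldl pvStepB1 (ord, [])).2) := by
  induction ts with
  | nil => intro ord acc; simp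
  | cons t ts ih =>
      intro ord acc
      rw [List.foldl_cons, List.foldl_cons,
        show pvStepB1 (ord, acc) t = ((pvStepB1 (ord, []) t).1, acc ++ (pvStepB1 (ord, []) t).2) from rfl]
      rw [ih (pvStepB1 (ord, []) t).1 (acc ++ (pvStepB1 (ord, []) t).2),
          ih (pvStepB1 (ord, []) t).1 (pvStepB1 (ord, []) t).2]
      simp

-- A's interleaved loop is B's phase 1 followed by replaying the recorded swaps
lemma sim (n : Nat) (W : List Nat) (hW : ∀ k ∈ W, k < n) (ts : List (Int × Int)) :
    ∀ (ord : List (Option Int)) (np : List Int), pvOInv n W ord → pvValid n W ts →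
      (ts.foldl pvStepA (np, ord)).2 = (ts.foldl pvStepB1 (ord, [])).1 ∧
      (ts.foldl pvStepA (np, ord)).1 = (ts.foldl pvStepB1 (ord, [])).2.foldl pvStepSwap np ∧
      pvOInv n W (ts.foldl pvStepB1 (ord, [])).1 ∧
      ∀ p ∈ (ts.foldl pvStepB1 (ord, [])).2, ∃ i j : Nat, i < n ∧ j < n ∧ p = (some (i : Int), some (j : Int)) := by
  induction ts with
  | nil => intro ord np h _; exact ⟨rfl, rfl, h, by simp⟩
  | cons t ts ih =>
      intro ord np h hv
      obtain ⟨ho, hOI⟩ := h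
      obtain ⟨ht1, ht2, htw1, htw2⟩ := hv t (by simp)
      obtain ⟨mL, hmL, hoL⟩ := hOI _ htw1
      obtain ⟨mR, hmR, hoR⟩ := hOI _ htw2
      have hiL : PySem.List.pyGetD ord t.1 none = some (mL : Int) :=
        pyGetD_eq_of_getElem? (by rw [ho]; exact ht1) (by rw [ho]) hoL
      have hiR : PySem.List.pyGetD ord t.2 none = some (mR : Int) :=
        pyGetD_eq_of_getElem? (by rw [ho]; exact ht2) (by rw [ho]) hoR
      -- the two loops update the order vector identically
      have hord : (pvStepA (np, ord) t).2 = (pvStepB1 (ord, []) t).1 := by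
        unfold pvStepA pvStepB1
        simp only [hiL, hiR, Option.getD_some]
      -- A's new position is the recorded swap applied to np
      have hnp : (pvStepA (np, ord) t).1
          = pvStepSwap np (PySem.List.pyGetD ord t.1 none, PySem.List.pyGetD ord t.2 none) := rfl
      -- the updated order vector still satisfies the invariant
      have hOI' : pvOInv n W (pvStepB1 (ord, []) t).1 := by
        have hset : (pvStepB1 (ord, []) t).1
            = (ord.set (pvIdx n t.1) (some (mR : Int))).set (pvIdx n t.2) (some (mL : Int)) := by
          unfold pvStepB1
          dsimp only
          rw [hiL, hiR]
          rw [pySetD_inrange _ _ _ (show PySem.Raise.InRange (PySem.List.pySetD ord t.1 (some (mR : Int))).length t.2 by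
            rw [PySem.List.length_pySetD, ho]; exact ht2)]
          rw [pySetD_inrange _ _ _ (show PySem.Raise.InRange ord.length t.1 by rw [ho]; exact ht1)]
          simp only [List.length_set, ho]
        rw [hset]
        refine ⟨by simp [ho], ?_⟩
        intro k hk
        by_cases hkR : k = pvIdx n t.2
        · subst hkR
          exact ⟨mL, hmL, List.getElem?_set_self (by simp [ho]; exact pvIdx_lt ht2)⟩
        · by_cases hkL : k = pvIdx n t.1
          · subst hkL
            refine ⟨mR, hmR, ?_⟩
            rw [List.getElem?_set_ne (fun hc => hkR hc.symm),
                List.getElem?_set_self (by simp [ho]; exact pvIdx_lt ht1)]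
          · obtain ⟨m, hm, hom⟩ := hOI _ hk
            refine ⟨m, hm, ?_⟩
            rw [List.getElem?_set_ne (fun hc => hkR hc.symm),
                List.getElem?_set_ne (fun hc => hkL hc.symm), hom]
      have hIH := ih (pvStepB1 (ord, []) t).1 (pvStepA (np, ord) t).1 hOI'
        (fun t' ht' => hv t' (by simp [ht']))
      obtain ⟨ih1, ih2, ih3, ih4⟩ := hIH
      have hfoldB : (t :: ts).foldl pvStepB1 (ord, [])
          = ((ts.foldl pvStepB1 ((pvStepB1 (ord, []) t).1, [])).1,
             (pvStepB1 (ord, []) t).2 ++ (ts.foldl pvStepB1 ((pvStepB1 (ord, []) t).1, [])).2) := by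
        rw [List.foldl_cons,
          show pvStepB1 (ord, []) t = ((pvStepB1 (ord, []) t).1, (pvStepB1 (ord, []) t).2) from rfl,
          b1_acc ts (pvStepB1 (ord, []) t).1 (pvStepB1 (ord, []) t).2]
      have hsnd2 : (pvStepB1 (ord, []) t).2
          = [(PySem.List.pyGetD ord t.1 none, PySem.List.pyGetD ord t.2 none)] := rfl
      have hpair : pvStepA (np, ord) t = ((pvStepA (np, ord) t).1, (pvStepB1 (ord, []) t).1) := by
        rw [← hord]
      refine ⟨?_, ?_, ?_, ?_⟩
      · rw [List.foldl_cons, hfoldB, hpair]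
        exact ih1
      · rw [List.foldl_cons, hfoldB, hpair]
        dsimp only
        rw [hsnd2]
        simp only [List.singleton_append, List.foldl_cons]
        rw [← hnp]
        exact ih2
      · rw [hfoldB]; exact ih3
      · rw [hfoldB]
        intro p hp
        rcases List.mem_append.mp hp with hp1 | hp2
        · rw [hsnd2] at hp1
          simp only [List.mem_singleton] at hp1
          exact ⟨mL, mR, hmL, hmR, by rw [hp1, hiL, hiR]⟩
        · exact ih4 p hp2

-- replaying the swaps commutes with gathering through any value list
lemma gather (n : Nat) (X : List Int) (sw : List (Option Int × Option Int))
    (hsw : ∀ p ∈ sw, ∃ i j : Nat, i < n ∧ j < n ∧ p = (some (i : Int), some (j : Int))) :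
    ∀ S : List Nat, S.length = n →
      sw.foldl pvStepSwap (S.map (fun m => X.getD m 0))
        = (sw.foldl pvSwapN S).map (fun m => X.getD m 0) := by
  induction sw with
  | nil => intro S _; rfl
  | cons p sw ih =>
      intro S hS
      obtain ⟨i, j, hi, hj, rfl⟩ := hsw p (by simp)
      have hstep : pvStepSwap (S.map (fun m => X.getD m 0)) (some (i : Int), some (j : Int))
          = (pvSwapN S (some (i : Int), some (j : Int))).map (fun m => X.getD m 0) := by
        have hjS : j < S.length := by omega
        have hiS : i < S.length := by omega
        have e1 : (S.map (fun m => X.getD m 0)).getD j 0 = X.getD (S.getD j 0) 0 := by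
          rw [List.getD_eq_getElem _ _ (by simpa using hjS), List.getElem_map,
              List.getD_eq_getElem _ _ hjS]
        have e2 : (S.map (fun m => X.getD m 0)).getD i 0 = X.getD (S.getD i 0) 0 := by
          rw [List.getD_eq_getElem _ _ (by simpa using hiS), List.getElem_map,
              List.getD_eq_getElem _ _ hiS]
        unfold pvStepSwap pvSwapN
        simp only [Option.getD_some, Int.toNat_natCast, PySem.List.pyGetD_natCast,
          PySem.List.pySetD_natCast]
        rw [e1, e2, List.map_set, List.map_set]
      rw [List.foldl_cons, List.foldl_cons, hstep]
      exact ih (fun q hq => hsw q (by simp [hq])) _ (by simp [pvSwapN, hS])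

-- entries of the composed index list stay below n
lemma swapN_entries (n : Nat) (sw : List (Option Int × Option Int))
    (hsw : ∀ p ∈ sw, ∃ i j : Nat, i < n ∧ j < n ∧ p = (some (i : Int), some (j : Int))) :
    ∀ S : List Nat, S.length = n → (∀ k, k < n → S.getD k 0 < n) →
      (sw.foldl pvSwapN S).length = n ∧ ∀ k, k < n → (sw.foldl pvSwapN S).getD k 0 < n := by
  induction sw with
  | nil => intro S h1 h2; exact ⟨h1, h2⟩
  | cons p sw ih =>
      intro S h1 h2
      obtain ⟨i, j, hi, hj, rfl⟩ := hsw p (by simp)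
      rw [List.foldl_cons]
      refine ih (fun q hq => hsw q (by simp [hq])) _ (by simp [pvSwapN, h1]) ?_
      intro k hk
      unfold pvSwapN
      simp only [Option.getD_some, Int.toNat_natCast]
      rw [List.getD_eq_getElem?_getD]
      by_cases hjk : j = k
      · subst hjk
        rw [List.getElem?_set_self (by simp [h1]; omega)]
        simpa using h2 i hi
      · rw [List.getElem?_set_ne hjk]
        by_cases hik : i = k
        · subst hik
          rw [List.getElem?_set_self (by omega)]
          simpa using h2 j hj
        · rw [List.getElem?_set_ne hik]
          have := h2 k hk
          rwa [List.getD_eq_getElem?_getD] at this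

def pvRangeInt (n : Nat) : List Int := List.map (fun k : Nat => (k : Int)) (List.range n)

lemma map_getD_range (xs : List Int) :
    (List.range xs.length).map (fun i => xs.getD i 0) = xs := by
  apply List.ext_getElem (by simp)
  intro i h1 h2
  simp [h2]

-- ===== VERDICT (by name: the statement is the Claim_ definition above) =====
theorem apply_transition_py_spec : Claim_equal_apply_transition_py := by
  intro position transition _ hpre
  obtain ⟨hb, hts⟩ := hpre
  unfold Spec_apply_transition_py
  set n := position.length with hn
  set W := position.map (pvIdx n) with hWdef
  have hW : ∀ k ∈ W, k < n := by
    intro k hk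
    obtain ⟨x, hx, rfl⟩ := List.mem_map.mp hk
    exact pvIdx_lt (hb x hx)
  set ord0 := convert_order_position_py position with hord0
  have hOI0 : pvOInv n W ord0 := by
    refine ⟨conv_length position, ?_⟩
    intro k hk
    obtain ⟨m, hm, hcm⟩ := conv_written position hb k hk
    exact ⟨m, hm, hcm⟩
  have hvalid : pvValid n W transition := fun t ht => hts t ht
  have hA : apply_transition_py position transition
      = (transition.foldl pvStepA (position, ord0)).1 := rfl
  have hB : apply_transition_py_alt position transition
      = ((transition.foldl pvStepB1 (ord0, [])).2.foldl pvStepSwap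
          (PySem.List.pyRange 0 (n : Int) 1)).map (fun s => PySem.List.pyGetD position s 0) := rfl
  obtain ⟨_, hA1, _, hswv⟩ := sim n W hW transition ord0 position hOI0 hvalid
  set sw := (transition.foldl pvStepB1 (ord0, [])).2 with hsw
  -- the A side, gathered through position
  have hposmap : position = (List.range n).map (fun m => position.getD m 0) :=
    (map_getD_range position).symm
  have hAg : (transition.foldl pvStepA (position, ord0)).1
      = (sw.foldl pvSwapN (List.range n)).map (fun m => position.getD m 0) := by
    rw [hA1]
    conv_lhs => rw [hposmap]
    exact gather n position sw hswv (List.range n) (by simp)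
  -- the B side, gathered through the identity
  have hsrc : PySem.List.pyRange 0 (n : Int) 1
      = (List.range n).map (fun m => (pvRangeInt n).getD m 0) := by
    rw [PySem.List.pyRange_one]
    simp only [sub_zero, Int.toNat_natCast]
    apply List.map_congr_left
    intro k hk
    simp only [pvRangeInt]
    rw [PySem.List.getD_map_range _ _ _ _ (List.mem_range.mp hk)]
    simp
  have hBg : sw.foldl pvStepSwap (PySem.List.pyRange 0 (n : Int) 1)
      = (sw.foldl pvSwapN (List.range n)).map (fun m => (pvRangeInt n).getD m 0) := by
    rw [hsrc]
    exact gather n (pvRangeInt n) sw hswv (List.range n) (by simp)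
  have hSf := swapN_entries n sw hswv (List.range n) (by simp)
    (fun k hk => by rw [List.getD_eq_getElem?_getD]; simp [List.getElem?_range hk]; omega)
  rw [hA, hB, hAg, hBg, List.map_map]
  apply List.map_congr_left
  intro m hm
  have hmn : m < n := by
    obtain ⟨k, hk, hkm⟩ := List.mem_iff_getElem.mp hm
    have := hSf.2 k (by omega)
    rwa [List.getD_eq_getElem?_getD, List.getElem?_eq_getElem hk, Option.getD_some, hkm] at this
  simp only [Function.comp_apply, pvRangeInt]
  rw [PySem.List.getD_map_range _ _ _ _ hmn]
  simp
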